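-- pv_equiv track=rewrite | github.com/Zhongkai-Zheng/TetrisGodClone | tetrisAI.py | rotateTestPiece
-- ===== SOURCE A (Python) =====
-- def rotateTestPiece(data, piece, rotations=1):
--     if rotations==0:
--         return piece
--     rows=len(piece[0])
--     cols=len(piece)
--     newpiece=[]
--     for i in range (0,rows):
--         newpiece.append(getCol(piece, rows-i-1))
--     return rotateTestPiece(data, newpiece, rotations-1)
--
-- def getCol(list, col):
-- #gets a column of a 2d list
--     result=[]
--     for row in list:
--         result.append(row[col])
--     return result
-- ===== SOURCE B (Python) =====
-- def rotateTestPiece(data, piece, rotations=1):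
--     cur = piece
--     while rotations != 0:
--         # one 90-degree rotation: transpose (truncating to the first row's
--         # width is irrelevant on rectangular input) then reverse the rows
--         cur = [list(r) for r in zip(*cur)][::-1]
--         rotations -= 1
--     return cur
-- ===== Notes on version B (the rewrite author's own statement) =====
-- stated objective: idiomatic
-- what changed: Replaces the recursive rebuild via a getCol helper scanning columns back-to-front with an iterative loop whose single step is the standard zip(*m) transpose followed by a row-order reversal.
import Mathlib
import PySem

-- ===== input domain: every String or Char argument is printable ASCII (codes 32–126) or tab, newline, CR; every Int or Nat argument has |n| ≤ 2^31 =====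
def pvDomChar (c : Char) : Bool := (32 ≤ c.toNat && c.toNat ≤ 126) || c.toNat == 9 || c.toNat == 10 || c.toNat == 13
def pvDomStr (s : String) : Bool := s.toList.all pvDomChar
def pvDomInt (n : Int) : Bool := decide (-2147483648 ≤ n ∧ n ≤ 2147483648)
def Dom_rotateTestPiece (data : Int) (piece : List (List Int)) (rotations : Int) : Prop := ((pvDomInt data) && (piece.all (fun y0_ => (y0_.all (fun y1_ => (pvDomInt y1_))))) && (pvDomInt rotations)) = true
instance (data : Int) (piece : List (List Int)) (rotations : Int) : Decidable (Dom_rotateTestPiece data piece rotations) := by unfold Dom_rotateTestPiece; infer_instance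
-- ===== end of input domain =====

-- B replaces A's recursive rebuild via a getCol helper with an iterative zip-transpose-then-reverse step (idiomatic rewrite; equal asymptotic cost).


-- ===== PORT A =====
-- getCol: 'for row in list: result.append(row[col])'; row[col] is row[col] with Python indexing
def pvGetCol (l : List (List Int)) (col : Int) : List Int :=
  l.map (fun row => (PySem.List.pyGet? row col).getD 0)

-- recursion on the rotation count; for rotations < 0 Python never terminates (excluded by Pre_)
def pvRotA (data : Int) (piece : List (List Int)) : Nat → List (List Int)
  | 0 => piece
  | n + 1 =>
    let rows := (piece.headD []).length
    let newpiece := (List.range rows).map (fun i : Nat => pvGetCol piece ((rows : Int) - (i : Int) - 1))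
    pvRotA data newpiece n

def rotateTestPiece (data : Int) (piece : List (List Int)) (rotations : Int) : List (List Int) :=
  pvRotA data piece rotations.toNat

-- ===== PORT B =====
-- zip(*cur): take heads while every row is nonempty
def pvZipT (rows : List (List Int)) : List (List Int) :=
  if h : rows = [] ∨ rows.any (·.isEmpty) then []
  else (rows.map (fun r => r.headD 0)) :: pvZipT (rows.map (·.tail))
termination_by (rows.headD []).length
decreasing_by
  push_neg at h
  obtain ⟨h1, h2⟩ := h
  match rows, h1 with
  | r :: rs, _ =>
    simp only [List.any_cons, Bool.or_eq_true] at h2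
    cases r with
    | nil => simp at h2
    | cons a as => simp

-- while rotations != 0: cur = [list(r) for r in zip(*cur)][::-1]; rotations -= 1
-- (for rotations < 0 the Python loop never terminates; excluded by Pre_)
def pvRotB (cur : List (List Int)) : Nat → List (List Int)
  | 0 => cur
  | n + 1 => pvRotB (pvZipT cur).reverse n

def rotateTestPiece_alt (data : Int) (piece : List (List Int)) (rotations : Int) : List (List Int) :=
  pvRotB piece rotations.toNat

-- ===== PRECONDITION & SPEC =====
-- Exactly where A returns: rotations ≥ 0 (negative counts recurse forever), and for rotations ≥ 1
-- the piece must be nonempty with every row at least as long as row 0 (else row[col] raises IndexError),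
-- and for rotations ≥ 2 row 0 must be nonempty (else the recursive call gets an empty piece and piece[0] raises).
def Pre_rotateTestPiece (data : Int) (piece : List (List Int)) (rotations : Int) : Prop :=
  0 ≤ rotations ∧ (rotations = 0 ∨
    (piece ≠ [] ∧ (∀ r ∈ piece, (piece.headD []).length ≤ r.length) ∧
      (rotations = 1 ∨ 0 < (piece.headD []).length)))
instance (data : Int) (piece : List (List Int)) (rotations : Int) : Decidable (Pre_rotateTestPiece data piece rotations) := by unfold Pre_rotateTestPiece; infer_instance

def pvWitness_rotateTestPiece : Int × List (List Int) × Int := (0, [[1, 2], [3, 4], [5, 6]], 3)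

def Spec_rotateTestPiece (data : Int) (piece : List (List Int)) (rotations : Int) (out : List (List Int)) : Prop := out = rotateTestPiece_alt data piece rotations
instance (data : Int) (piece : List (List Int)) (rotations : Int) (out : List (List Int)) : Decidable (Spec_rotateTestPiece data piece rotations out) := by unfold Spec_rotateTestPiece; infer_instance

-- ===== CLAIM (what is proved, stated in full; the proofs are below) =====
def Claim_equal_rotateTestPiece : Prop := ∀ (data : Int) (piece : List (List Int)) (rotations : Int), Dom_rotateTestPiece data piece rotations → Pre_rotateTestPiece data piece rotations → Spec_rotateTestPiece data piece rotations (rotateTestPiece data piece rotations)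

-- ===== LEMMAS AND PROOFS =====

-- zip(*rows) on a piece whose every row is at least as long as row 0 (of length L)
lemma pvZipT_eq (L : Nat) : ∀ (rows : List (List Int)), rows ≠ [] →
    (rows.headD []).length = L → (∀ r ∈ rows, L ≤ r.length) →
    pvZipT rows = (List.range L).map (fun i => rows.map (fun r => r.getD i 0)) := by
  induction L with
  | zero =>
    intro rows hne hL _
    match rows, hne with
    | r :: rs, _ =>
      simp only [List.headD_cons] at hL
      rw [pvZipT]
      simp [List.length_eq_zero_iff.mp hL]
  | succ L ih =>
    intro rows hne hL hall
    have hnoempty : rows.any (·.isEmpty) = false := by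
      simp only [List.any_eq_false]
      intro r hr
      have := hall r hr
      simp only [Bool.not_eq_true, List.isEmpty_eq_false_iff, ← List.length_pos_iff]
      omega
    rw [pvZipT]
    rw [dif_neg (by simp [hne, hnoempty])]
    have htne : rows.map (·.tail) ≠ [] := by simp [hne]
    have ihr := ih (rows.map (·.tail)) htne
      (by
        match rows, hne with
        | r :: rs, _ =>
          simp only [List.headD_cons] at hL ⊢
          simp [List.length_tail, hL])
      (by
        intro r hr
        simp only [List.mem_map] at hr
        obtain ⟨r0, hr0, rfl⟩ := hr
        have := hall r0 hr0
        simp only [List.length_tail]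
        omega)
    rw [ihr, List.range_succ_eq_map]
    simp only [List.map_cons, List.map_map]
    congr 1
    · apply List.map_congr_left
      intro r hr
      have hlen := hall r hr
      match r, (by omega : 0 < r.length) with
      | a :: as, _ => rfl
    · apply List.map_congr_left
      intro i _
      apply List.map_congr_left
      intro r hr
      have hlen := hall r hr
      match r, (by omega : 0 < r.length) with
      | a :: as, _ => rfl

-- reversing a map over range reads the indices back-to-front
lemma reverse_map_range {α : Type} (L : Nat) (f : Nat → α) :
    ((List.range L).map f).reverse = (List.range L).map (fun i => f (L - 1 - i)) := by
  apply List.ext_getElem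
  · simp
  · intro i h1 h2
    simp only [List.length_reverse, List.length_map, List.length_range] at h1
    simp only [List.getElem_reverse, List.getElem_map, List.getElem_range, List.length_map,
      List.length_range]

-- A's single rotation step equals B's (transpose then reverse) on a valid piece
lemma step_eq (piece : List (List Int)) (hne : piece ≠ [])
    (hall : ∀ r ∈ piece, (piece.headD []).length ≤ r.length) :
    (List.range (piece.headD []).length).map
        (fun i : Nat => pvGetCol piece (((piece.headD []).length : Int) - (i : Int) - 1))
      = (pvZipT piece).reverse := by
  set L := (piece.headD []).length with hLdef
  rw [pvZipT_eq L piece hne rfl hall, reverse_map_range]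
  apply List.map_congr_left
  intro i hi
  simp only [List.mem_range] at hi
  unfold pvGetCol
  apply List.map_congr_left
  intro r hr
  have hlen := hall r hr
  have h0 : (0:Int) ≤ (L : Int) - i - 1 := by omega
  have h1 : ((L : Int) - i - 1) < (r.length : Int) := by omega
  rw [PySem.List.pyGet?_of_nonneg r h0]
  have ht : ((L : Int) - i - 1).toNat = L - 1 - i := by omega
  rw [ht]
  rfl

-- the main fuel induction: both loops agree on valid pieces
lemma rot_eq (data : Int) : ∀ (n : Nat) (piece : List (List Int)), piece ≠ [] →
    (∀ r ∈ piece, (piece.headD []).length ≤ r.length) →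
    (n ≤ 1 ∨ 0 < (piece.headD []).length) →
    pvRotA data piece n = pvRotB piece n := by
  intro n
  induction n with
  | zero => intro piece _ _ _; rfl
  | succ n ih =>
    intro piece hne hall hpos
    simp only [pvRotA, pvRotB]
    rw [step_eq piece hne hall]
    cases n with
    | zero => rfl
    | succ m =>
      set L := (piece.headD []).length with hLdef
      have hL : 0 < L := by omega
      have hzip := pvZipT_eq L piece hne rfl hall
      have hform : (pvZipT piece).reverse
          = ((List.range L).map (fun i => piece.map (fun r => r.getD i 0))).reverse := by
        rw [hzip]
      have hlenrev : (pvZipT piece).reverse.length = L := by simp [hform]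
      have hne' : (pvZipT piece).reverse ≠ [] := by
        simp only [← List.length_pos_iff, hlenrev]; omega
      apply ih _ hne'
      · intro r hr
        have hhead : ∀ s ∈ (pvZipT piece).reverse, s.length = piece.length := by
          intro s hs
          rw [hform] at hs
          simp only [List.mem_reverse, List.mem_map, List.mem_range] at hs
          obtain ⟨i, _, rfl⟩ := hs
          simp
        have h1 := hhead r hr
        have h2 := hhead ((pvZipT piece).reverse.headD []) (by
          match (pvZipT piece).reverse, hne' with
          | s :: ss, _ => simp)
        omega
      · right
        have hhead := (by
          match (pvZipT piece).reverse, hne' with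
          | s :: ss, _ => simp : ((pvZipT piece).reverse.headD []) ∈ (pvZipT piece).reverse)
        rw [hform] at hhead
        simp only [List.mem_reverse, List.mem_map, List.mem_range] at hhead
        obtain ⟨i, _, heq⟩ := hhead
        rw [hform, ← heq]
        simp only [List.length_map, List.length_pos_iff]
        exact hne

-- ===== VERDICT (by name: the statement is the Claim_ definition above) =====
theorem rotateTestPiece_spec : Claim_equal_rotateTestPiece := by
  intro data piece rotations _ hpre
  obtain ⟨hnn, hcase⟩ := hpre
  unfold Spec_rotateTestPiece rotateTestPiece rotateTestPiece_alt
  rcases hcase with h0 | ⟨hne, hall, hpos⟩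
  · subst h0; rfl
  · apply rot_eq data rotations.toNat piece hne hall
    omega
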